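-- pv_equiv track=rewrite | github.com/TharaniDJ/Genealogy-Tree-Creator | backend/species-tree-service/app/utils/helpers.py | build_taxonomic_hierarchy
-- ===== SOURCE A (Python) =====
-- from typing import List, Dict, Set, Optional
--
-- def build_taxonomic_hierarchy(relationships: List[Dict[str, str]]) -> Dict:
--     """Build hierarchical taxonomic structure from flat relationship list"""
--     hierarchy = {}
--
--     # Group by relationship type
--     by_type = {}
--     for rel in relationships:
--         rel_type = rel["relationship"]
--         if rel_type not in by_type:
--             by_type[rel_type] = []
--         by_type[rel_type].append(rel)
--
--     return by_type
-- ===== SOURCE B (Python) =====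
-- def build_taxonomic_hierarchy(relationships):
--     """Build hierarchical taxonomic structure from flat relationship list"""
--     types = list(dict.fromkeys(rel["relationship"] for rel in relationships))
--     return {t: [rel for rel in relationships if rel["relationship"] == t] for t in types}
-- ===== Notes on version B (the rewrite author's own statement) =====
-- stated objective: alternative
-- what changed: Instead of one bucketing pass that mutates per-type lists in a dict, B first collects the distinct relationship types in first-occurrence order (dict.fromkeys) and then builds each group by a per-type filter comprehension.
import Mathlib
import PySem

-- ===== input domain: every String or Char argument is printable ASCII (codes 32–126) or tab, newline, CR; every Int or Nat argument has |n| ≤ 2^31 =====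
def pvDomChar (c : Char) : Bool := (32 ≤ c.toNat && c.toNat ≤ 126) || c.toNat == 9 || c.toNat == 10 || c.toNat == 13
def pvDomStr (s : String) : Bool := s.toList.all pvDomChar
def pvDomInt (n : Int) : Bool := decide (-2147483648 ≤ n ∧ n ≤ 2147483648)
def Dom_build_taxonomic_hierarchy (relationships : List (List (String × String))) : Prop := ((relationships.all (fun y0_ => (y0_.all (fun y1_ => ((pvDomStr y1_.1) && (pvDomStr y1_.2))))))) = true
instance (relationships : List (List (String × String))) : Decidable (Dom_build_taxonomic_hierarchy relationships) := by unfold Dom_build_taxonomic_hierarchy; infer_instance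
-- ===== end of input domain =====

-- ===== PORT A =====
-- B differs from A in decomposition only (distinct-keys pass + per-type filters vs one bucketing pass); same return value.
-- rel["relationship"]: first-match lookup in the association list (Python dict has unique keys); total under Pre_.
def relKey (rel : List (String × String)) : String :=
  (PySem.Dict.mk rel).getD "relationship" ""

def build_taxonomic_hierarchy (relationships : List (List (String × String))) : List (String × List (List (String × String))) :=
  (relationships.foldl (fun by_type rel =>
      let rel_type := relKey rel
      let by_type := if by_type.contains rel_type then by_type else by_type.insert rel_type []
      by_type.modify rel_type [] (· ++ [rel]))
    PySem.Dict.empty).items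

-- ===== PORT B =====
def build_taxonomic_hierarchy_alt (relationships : List (List (String × String))) : List (String × List (List (String × String))) :=
  (PySem.List.dedup (relationships.map relKey)).map
    (fun t => (t, relationships.filter (fun rel => relKey rel == t)))

-- ===== PRECONDITION & SPEC =====
-- Pre_ excludes exactly the inputs where some dict lacks the "relationship" key, on which A (and B) raise KeyError.
def Pre_build_taxonomic_hierarchy (relationships : List (List (String × String))) : Prop :=
  ∀ rel ∈ relationships, "relationship" ∈ rel.map Prod.fst
instance (relationships : List (List (String × String))) : Decidable (Pre_build_taxonomic_hierarchy relationships) := by unfold Pre_build_taxonomic_hierarchy; infer_instance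
def pvWitness_build_taxonomic_hierarchy : (List (List (String × String))) :=
  [[("relationship", "parent"), ("species", "Canis lupus")],
   [("relationship", "child"), ("species", "Canis familiaris")],
   [("relationship", "parent"), ("species", "Felis catus")]]
def Spec_build_taxonomic_hierarchy (relationships : List (List (String × String))) (out : List (String × List (List (String × String)))) : Prop := out = build_taxonomic_hierarchy_alt relationships
instance (relationships : List (List (String × String))) (out : List (String × List (List (String × String)))) : Decidable (Spec_build_taxonomic_hierarchy relationships out) := by unfold Spec_build_taxonomic_hierarchy; infer_instance

-- ===== CLAIM (what is proved, stated in full; the proofs are below) =====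
def Claim_equal_build_taxonomic_hierarchy : Prop := ∀ (relationships : List (List (String × String))), Dom_build_taxonomic_hierarchy relationships → Pre_build_taxonomic_hierarchy relationships → Spec_build_taxonomic_hierarchy relationships (build_taxonomic_hierarchy relationships)

-- ===== LEMMAS AND PROOFS =====

-- A's per-element step ('if absent insert []; then append') is the single 'modify with default []' step.
theorem step_eq (d : PySem.Dict String (List (List (String × String)))) (t : String) (x : List (String × String)) :
    (if d.contains t then d else d.insert t []).modify t [] (· ++ [x]) = d.modify t [] (· ++ [x]) := by
  by_cases h : d.contains t
  · rw [if_pos h]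
  · rw [if_neg h]
    rw [Bool.not_eq_true] at h
    have hne : ∀ p ∈ d.items, p.1 ≠ t := by
      intro p hp he
      have : p.1 ∈ d.keys := PySem.Dict.mem_keys_of_mem_items (d := d) hp
      rw [he, ← PySem.Dict.contains_iff_mem_keys, h] at this; exact Bool.false_ne_true this
    simp [PySem.Dict.modify, PySem.Dict.insert, h]
    constructor
    · calc List.map (fun p => if p.1 = t then (t, ({ items := d.items ++ [(t, [])] } : PySem.Dict String (List (List (String × String)))).getD t [] ++ [x]) else p) d.items
          = List.map id d.items := List.map_congr_left (fun p hp => by simp [hne p hp])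
        _ = d.items := List.map_id d.items
    · have h2 : ({ items := d.items ++ [(t, [])] } : PySem.Dict String (List (List (String × String)))) = d.insert t [] := by
        simp [PySem.Dict.insert, h]
      rw [h2, PySem.Dict.getD_insert_self, PySem.Dict.getD_of_not_contains d [] h]

theorem fold_eq (relationships : List (List (String × String))) :
    relationships.foldl (fun by_type rel =>
      let rel_type := relKey rel
      let by_type := if by_type.contains rel_type then by_type else by_type.insert rel_type []
      by_type.modify rel_type [] (· ++ [rel])) PySem.Dict.empty
    = (relationships.map (fun r => (relKey r, r))).foldl
        (fun d p => d.modify p.1 [] (· ++ [p.2])) PySem.Dict.empty := by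
  rw [List.foldl_map]
  exact PySem.List.foldl_congr_mem _ _ _ _ (fun d rel _ => step_eq d (relKey rel) rel)

theorem key_lemmas (relationships : List (List (String × String))) :
    (relationships.foldl (fun by_type rel =>
      let rel_type := relKey rel
      let by_type := if by_type.contains rel_type then by_type else by_type.insert rel_type []
      by_type.modify rel_type [] (· ++ [rel])) PySem.Dict.empty).items
    = build_taxonomic_hierarchy_alt relationships := by
  rw [fold_eq]
  set l := relationships.map (fun r => (relKey r, r)) with hl
  set d := l.foldl (fun d p => d.modify p.1 [] (· ++ [p.2])) PySem.Dict.empty with hd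
  have hkeys : d.keys = PySem.Set.ofList (relationships.map relKey) := by
    rw [hd, hl, List.foldl_map]
    have := PySem.Dict.keys_foldl_modify_key (l := relationships) (key := relKey)
      (d0 := ([] : List (List (String × String))))
      (f := fun d rel => fun v => v ++ [rel]) (d := PySem.Dict.empty)
    simpa [PySem.Dict.keys_empty, PySem.Set.update, PySem.Set.ofList_eq_foldl] using this
  have hnodup : d.keys.Nodup := by
    rw [hkeys]; exact PySem.Set.nodup_ofList _
  have hgetD : ∀ c, d.getD c [] = relationships.filter (fun rel => relKey rel == c) := by
    intro c
    rw [hd, PySem.Dict.getD_foldl_modify_append, PySem.Dict.getD_empty, List.nil_append, hl,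
      List.filter_map, List.map_map]
    simp only [Function.comp_def]
    simp
  rw [PySem.Dict.items_eq_map_keys d hnodup []]
  unfold build_taxonomic_hierarchy_alt
  rw [hkeys]
  simp only [PySem.List.dedup_eq_ofList]
  exact List.map_congr_left (fun t _ => by rw [hgetD t])

-- ===== VERDICT (by name: the statement is the Claim_ definition above) =====
theorem build_taxonomic_hierarchy_spec : Claim_equal_build_taxonomic_hierarchy := by
  intro relationships _ _
  unfold Spec_build_taxonomic_hierarchy build_taxonomic_hierarchy
  exact key_lemmas relationships
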